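-- pv_equiv track=rewrite | github.com/gudwh14/algorithm | boj/greedy/단어 수학.py | solution
-- ===== SOURCE A (Python) =====
-- import collections
--
-- def solution(N, words):
--     answer = 0
--     value = 9
--     alphabet = collections.defaultdict(int)
--
--     # 자리숫에대한 가중치 구하기
--     for word in words:
--         n = len(word)
--         for i in range(n):
--             alphabet[word[i]] += 10 ** (n - i - 1)
--
--     # 가중치를 기준으로 알파벳 정렬
--     a = sorted(list(alphabet.items()), key=lambda x: x[1], reverse=True)
--     alphabet = {}
--
--     # 수 매핑하기
--     for char, weight in a:
--         alphabet[char] = value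
--         value -= 1
--
--     # 수 더하기
--     for word in words:
--         temp = []
--         for char in word:
--             temp.append(str(alphabet[char]))
--         answer += int(''.join(temp))
--
--     return answer
-- ===== SOURCE B (Python) =====
-- def solution(N, words):
--     weight = {}
--     for word in words:
--         n = len(word)
--         for i, ch in enumerate(word):
--             weight[ch] = weight.get(ch, 0) + 10 ** (n - i - 1)
--     total = 0
--     for value, (_, w) in enumerate(sorted(weight.items(), key=lambda x: x[1], reverse=True)):
--         total += w * (9 - value)
--     return total
-- ===== Notes on version B (the rewrite author's own statement) =====
-- stated objective: faster
-- what changed: B drops A's entire second pass (rebuilding each word as a digit string and parsing it with int(''.join(...))): it accumulates the answer directly as weight * assigned-digit while enumerating the sorted letters.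
-- outside the precondition, e.g. on solution(0, ['XAOT', 'TPA', 'JBB', 'MLTA', 'TCP', 'FA']): A returns 20038, B returns 20050; on solution(3, ['']): A raises ValueError, B returns 0
import Mathlib
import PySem

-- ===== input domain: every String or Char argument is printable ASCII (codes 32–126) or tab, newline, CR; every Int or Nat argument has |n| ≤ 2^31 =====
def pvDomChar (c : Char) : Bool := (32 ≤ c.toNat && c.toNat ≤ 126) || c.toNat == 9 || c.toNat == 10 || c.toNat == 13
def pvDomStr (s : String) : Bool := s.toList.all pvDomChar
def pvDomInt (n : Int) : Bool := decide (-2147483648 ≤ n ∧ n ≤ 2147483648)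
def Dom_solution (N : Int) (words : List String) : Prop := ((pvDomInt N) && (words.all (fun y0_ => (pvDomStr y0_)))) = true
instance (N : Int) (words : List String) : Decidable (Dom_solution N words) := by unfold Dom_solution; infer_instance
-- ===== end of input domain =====

-- B drops A's second pass over the words (digit-string rebuilding + int() parsing) and sums
-- weight * assigned-digit directly while enumerating the sorted letters.
-- ===== PORT A =====
-- first loop of A: for word in words: for i in range(len(word)): alphabet[word[i]] += 10**(len(word)-i-1)
-- (word[i] is always in range here, so the total pyGetD with an unused default is exact)
def buildWeightsA (words : List String) : PySem.Dict Char Int :=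
  words.foldl (fun d word =>
    let cs := word.toList
    let n : Int := PySem.Str.len word
    (PySem.List.pyRange 0 n).foldl
      (fun d i => d.modify (PySem.List.pyGetD cs i ' ') 0 (fun v => v + (10 : Int) ^ (n - i - 1).toNat)) d)
    PySem.Dict.empty

-- second loop of A: for char, weight in a: alphabet[char] = value; value -= 1   (value starts at 9)
def assignA (a : List (Char × Int)) : PySem.Dict Char Int × Int :=
  a.foldl (fun p cw => (p.1.insert cw.1 p.2, p.2 - 1)) (PySem.Dict.empty, 9)

-- third loop body of A: answer += int(''.join(str(alphabet[char]) for char in word))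
-- (every char of word is a key of the mapping here, so getD's unused default is exact;
--  int(''.join ..) raising ValueError = ofChars? returning none, excluded by Pre_)
def wordNumA (m : PySem.Dict Char Int) (word : String) : Int :=
  (PySem.Int.ofChars?
    (PySem.Chars.join []
      (word.toList.foldl (fun t c => t ++ [PySem.Int.toChars (m.getD c 0)]) []))).getD 0

def solution (N : Int) (words : List String) : Int :=
  let alphabet := buildWeightsA words
  let a := PySem.List.sorted alphabet.items (fun x => x.2) true
  let m := (assignA a).1
  words.foldl (fun answer word => answer + wordNumA m word) 0

-- ===== PORT B =====
-- first loop of B: for i, ch in enumerate(word): weight[ch] = weight.get(ch, 0) + 10**(len(word)-i-1)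
def buildWeightsB (words : List String) : PySem.Dict Char Int :=
  words.foldl (fun d word =>
    let n : Int := PySem.Str.len word
    (PySem.List.enumerate word.toList).foldl
      (fun d ic => d.insert ic.2 (d.getD ic.2 0 + (10 : Int) ^ (n - ic.1 - 1).toNat)) d)
    PySem.Dict.empty

-- for value, (_, w) in enumerate(sorted(weight.items(), key=..., reverse=True)): total += w * (9 - value)
def solution_alt (N : Int) (words : List String) : Int :=
  (PySem.List.enumerate
    (PySem.List.sorted (buildWeightsB words).items (fun x => x.2) true)).foldl
    (fun total vp => total + vp.2.2 * (9 - vp.1)) 0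

-- ===== PRECONDITION & SPEC =====
-- Pre_ excludes words lists containing an empty word, on which A raises ValueError via int(''),
-- and inputs with more than 10 distinct characters, where A assigns negative "digits" whose
-- concatenation usually raises ValueError and otherwise parses accidentally (e.g. '-19' mid-word).
def Pre_solution (N : Int) (words : List String) : Prop :=
  (∀ w ∈ words, w ≠ "") ∧ (PySem.Set.ofList (words.flatMap String.toList)).length ≤ 10

instance (N : Int) (words : List String) : Decidable (Pre_solution N words) := by
  unfold Pre_solution; infer_instance

def pvWitness_solution : Int × List String := (2, ["AB", "BA", "CAB"])

def Spec_solution (N : Int) (words : List String) (out : Int) : Prop := out = solution_alt N words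
instance (N : Int) (words : List String) (out : Int) : Decidable (Spec_solution N words out) := by
  unfold Spec_solution; infer_instance

-- ===== CLAIM (what is proved, stated in full; the proofs are below) =====
def Claim_equal_solution : Prop := ∀ (N : Int) (words : List String), Dom_solution N words → Pre_solution N words → Spec_solution N words (solution N words)

-- ===== LEMMAS AND PROOFS =====

-- ---------- decimal parsing (A's int(''.join(...))) ----------
theorem digit_not_space (c : Char) (h : c.isDigit = true) : PySem.Int.isIntSpace c = false := by
  have h48 : 48 ≤ c.toNat ∧ c.toNat ≤ 57 := by
    simp only [Char.isDigit, decide_eq_true_eq, Bool.and_eq_true, ge_iff_le] at h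
    exact ⟨h.1, h.2⟩
  simp only [PySem.Int.isIntSpace, Bool.or_eq_false_iff, decide_eq_false_iff_not]
  refine ⟨⟨⟨⟨⟨?_, ?_⟩, ?_⟩, ?_⟩, ?_⟩, ?_⟩ <;> rintro rfl <;> revert h48 <;> decide

theorem digit10 (c : Char) (h : c.isDigit = true) :
    c = '0' ∨ c = '1' ∨ c = '2' ∨ c = '3' ∨ c = '4' ∨ c = '5' ∨ c = '6' ∨ c = '7' ∨ c = '8' ∨ c = '9' := by
  have hb : 48 ≤ c.toNat ∧ c.toNat ≤ 57 := by
    simp only [Char.isDigit, decide_eq_true_eq, Bool.and_eq_true, ge_iff_le] at h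
    exact ⟨h.1, h.2⟩
  have h10 : c.toNat = 48 ∨ c.toNat = 49 ∨ c.toNat = 50 ∨ c.toNat = 51 ∨ c.toNat = 52 ∨
      c.toNat = 53 ∨ c.toNat = 54 ∨ c.toNat = 55 ∨ c.toNat = 56 ∨ c.toNat = 57 := by omega
  rcases h10 with hn|hn|hn|hn|hn|hn|hn|hn|hn|hn
  · exact Or.inl (Char.ext (UInt32.toNat_inj.mp hn))
  · exact Or.inr <| Or.inl (Char.ext (UInt32.toNat_inj.mp hn))
  · exact Or.inr <| Or.inr <| Or.inl (Char.ext (UInt32.toNat_inj.mp hn))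
  · exact Or.inr <| Or.inr <| Or.inr <| Or.inl (Char.ext (UInt32.toNat_inj.mp hn))
  · exact Or.inr <| Or.inr <| Or.inr <| Or.inr <| Or.inl (Char.ext (UInt32.toNat_inj.mp hn))
  · exact Or.inr <| Or.inr <| Or.inr <| Or.inr <| Or.inr <| Or.inl (Char.ext (UInt32.toNat_inj.mp hn))
  · exact Or.inr <| Or.inr <| Or.inr <| Or.inr <| Or.inr <| Or.inr <| Or.inl (Char.ext (UInt32.toNat_inj.mp hn))
  · exact Or.inr <| Or.inr <| Or.inr <| Or.inr <| Or.inr <| Or.inr <| Or.inr <| Or.inl (Char.ext (UInt32.toNat_inj.mp hn))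
  · exact Or.inr <| Or.inr <| Or.inr <| Or.inr <| Or.inr <| Or.inr <| Or.inr <| Or.inr <| Or.inl (Char.ext (UInt32.toNat_inj.mp hn))
  · exact Or.inr <| Or.inr <| Or.inr <| Or.inr <| Or.inr <| Or.inr <| Or.inr <| Or.inr <| Or.inr (Char.ext (UInt32.toNat_inj.mp hn))

-- the private digit-scanning loop of PySem.Int.ofChars?, abstracted by its (definitional) equations
theorem go_digits_abs (g : List Char → Bool → Nat → Option Nat)
    (h0 : ∀ b acc, g [] b acc = if b then some acc else none)
    (h1a : ∀ c d tail b acc, g (c :: d :: tail) b acc =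
      if c.isDigit then g (d :: tail) true (acc * 10 + (c.toNat - '0'.toNat))
      else if c = '_' ∧ b then (if d.isDigit then g (d :: tail) false acc else none) else none)
    (h1b : ∀ c b acc, g [c] b acc =
      if c.isDigit then g [] true (acc * 10 + (c.toNat - '0'.toNat))
      else if c = '_' ∧ b then none else none) :
    ∀ cs acc, (∀ c ∈ cs, c.isDigit = true) →
      g cs true acc = some (cs.foldl (fun a c => a * 10 + (c.toNat - '0'.toNat)) acc) := by
  intro cs
  induction cs with
  | nil => intro acc _; rw [h0]; simp
  | cons c t ih =>
    intro acc hdig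
    have hc : c.isDigit = true := hdig c (List.mem_cons_self ..)
    cases t with
    | nil => rw [h1b, if_pos hc, h0]; simp
    | cons d tail =>
      rw [h1a, if_pos hc, ih _ (fun x hx => hdig x (List.mem_cons_of_mem _ hx))]
      simp

theorem finishAbs (g : List Char → Bool → Nat → Option Nat)
    (hex : (∀ b acc, g [] b acc = if b then some acc else none) ∧
      (∀ c d tail b acc, g (c :: d :: tail) b acc =
        if c.isDigit then g (d :: tail) true (acc * 10 + (c.toNat - '0'.toNat))
        else if c = '_' ∧ b then (if d.isDigit then g (d :: tail) false acc else none) else none) ∧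
      (∀ c b acc, g [c] b acc =
        if c.isDigit then g [] true (acc * 10 + (c.toNat - '0'.toNat))
        else if c = '_' ∧ b then none else none))
    (t : List Char) (acc : Nat) (hdig : ∀ x ∈ t, x.isDigit = true) (target : Nat)
    (htarget : t.foldl (fun a c => a * 10 + (c.toNat - '0'.toNat)) acc = target) :
    Option.map (fun n : Int => n) (do
        let a ← g t true acc
        pure ((a : Nat) : Int)) = some ((target : Nat) : Int) := by
  obtain ⟨h0, h1a, h1b⟩ := hex
  rw [go_digits_abs g h0 h1a h1b t acc hdig, htarget]
  rfl

theorem parse_digits (ds : List Char) (hne : ds ≠ []) (hdig : ∀ c ∈ ds, c.isDigit = true) :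
    PySem.Int.ofChars? ds =
      some ((ds.foldl (fun a c => a * 10 + (c.toNat - '0'.toNat)) 0 : Nat) : Int) := by
  cases ds with
  | nil => exact absurd rfl hne
  | cons c t =>
    have h1 : List.dropWhile PySem.Int.isIntSpace (c :: t) = c :: t := by
      rw [List.dropWhile_cons, digit_not_space c (hdig c (List.mem_cons_self ..))]
      simp
    have h2 : List.dropWhile PySem.Int.isIntSpace (c :: t).reverse = (c :: t).reverse := by
      cases hr : (c :: t).reverse with
      | nil => simp at hr
      | cons d r =>
        have hd : d ∈ c :: t := by
          rw [← List.mem_reverse, hr]; exact List.mem_cons_self ..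
        rw [List.dropWhile_cons, digit_not_space d (hdig d hd)]
        simp
    have hdt : ∀ x ∈ t, x.isDigit = true := fun x hx => hdig x (List.mem_cons_of_mem _ hx)
    simp only [PySem.Int.ofChars?]
    rw [h1, h2, List.reverse_reverse]
    split
    · rename_i ds' heq
      obtain ⟨rfl, -⟩ := List.cons.inj heq
      have := hdig '-' (List.mem_cons_self ..)
      simp at this
    · rename_i ds' heq
      obtain ⟨rfl, -⟩ := List.cons.inj heq
      have := hdig '+' (List.mem_cons_self ..)
      simp at this
    · rcases digit10 c (hdig c (List.mem_cons_self ..)) with rfl|rfl|rfl|rfl|rfl|rfl|rfl|rfl|rfl|rfl <;>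
      · conv_lhs => whnf
        refine finishAbs _ ⟨fun _ _ => rfl, fun _ _ _ _ _ => rfl, fun _ _ _ => rfl⟩ t _ hdt _ ?_
        simp [List.foldl_cons]

-- ---------- single digits ----------
def digitChr (v : Int) : Char := Char.ofNat (48 + v.toNat)

theorem toChars_digit (v : Int) (h0 : 0 ≤ v) (h9 : v ≤ 9) :
    PySem.Int.toChars v = [digitChr v] := by
  interval_cases v <;> decide

theorem digitChr_isDigit (v : Int) (h0 : 0 ≤ v) (h9 : v ≤ 9) :
    (digitChr v).isDigit = true := by
  interval_cases v <;> decide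

theorem digitChr_toNat (v : Int) (h0 : 0 ≤ v) (h9 : v ≤ 9) :
    ((digitChr v).toNat - '0'.toNat : Nat) = v.toNat := by
  interval_cases v <;> decide

-- ---------- itemSum invariants for the weight dict ----------
def itemSum (v : Char → Int) (l : List (Char × Int)) : Int :=
  (l.map (fun p => v p.1 * p.2)).sum

theorem sum_update (x : Int) (c : Char) (f g : Char → Int) :
    ∀ (l : List Char), l.Nodup → c ∈ l → g c = f c + x → (∀ k ∈ l, k ≠ c → g k = f k) →
      (l.map g).sum = (l.map f).sum + x := by
  intro l
  induction l with
  | nil => intro _ hc; simp at hc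
  | cons a l ih =>
    intro hnd hc hgc hother
    rcases List.mem_cons.mp hc with rfl|hcl
    · have hl : ∀ k ∈ l, g k = f k := by
        intro k hk
        exact hother k (List.mem_cons_of_mem _ hk) (fun hkc => (List.nodup_cons.mp hnd).1 (hkc ▸ hk))
      simp only [List.map_cons, List.sum_cons, hgc, List.map_congr_left hl]
      ring
    · have ha : g a = f a := hother a (List.mem_cons_self ..) (fun hac => (List.nodup_cons.mp hnd).1 (hac ▸ hcl))
      simp only [List.map_cons, List.sum_cons, ha,
        ih (List.nodup_cons.mp hnd).2 hcl hgc (fun k hk => hother k (List.mem_cons_of_mem _ hk))]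
      ring

theorem insert_itemSum (v : Char → Int) (d : PySem.Dict Char Int) (c : Char) (p : Int)
    (hnd : d.keys.Nodup) :
    itemSum v (d.insert c (d.getD c 0 + p)).items = itemSum v d.items + v c * p := by
  by_cases hc : d.contains c = true
  · have hkeys : (d.insert c (d.getD c 0 + p)).keys = d.keys := PySem.Dict.keys_insert_of_contains d _ hc
    rw [itemSum, PySem.Dict.items_eq_map_keys _ (by rw [hkeys]; exact hnd) 0, itemSum,
      PySem.Dict.items_eq_map_keys d hnd 0, hkeys, List.map_map, List.map_map]
    refine sum_update (v c * p) c _ _ d.keys hnd ((PySem.Dict.contains_iff_mem_keys d c).mp hc) ?_ ?_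
    · simp only [Function.comp_apply, PySem.Dict.getD_insert_self]
      ring
    · intro k _ hk
      simp only [Function.comp_apply, PySem.Dict.getD_insert_of_ne d _ _ hk]
  · have hget : d.getD c 0 = 0 := by
      rw [PySem.Dict.getD, (PySem.Dict.get?_eq_none_iff_not_mem_keys d c).mpr
        (fun hmem => hc ((PySem.Dict.contains_iff_mem_keys d c).mpr hmem))]
      rfl
    rw [itemSum, PySem.Dict.items_insert_of_not_contains d _ (Bool.not_eq_true _ ▸ hc),
      List.map_append, List.sum_append, hget]
    simp [itemSum]

theorem fold_insert_itemSum (v : Char → Int) (n : Int) :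
    ∀ (E : List (Int × Char)) (d : PySem.Dict Char Int), d.keys.Nodup →
      (E.foldl (fun d ic => d.insert ic.2 (d.getD ic.2 0 + (10 : Int) ^ (n - ic.1 - 1).toNat)) d).keys.Nodup ∧
      itemSum v (E.foldl (fun d ic => d.insert ic.2 (d.getD ic.2 0 + (10 : Int) ^ (n - ic.1 - 1).toNat)) d).items =
        itemSum v d.items +
          (E.map (fun ic => v ic.2 * (10 : Int) ^ (n - ic.1 - 1).toNat)).sum := by
  intro E
  induction E with
  | nil => intro d hnd; simpa using hnd
  | cons ic E ih =>
    intro d hnd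
    obtain ⟨hnd', hsum⟩ := ih (d.insert ic.2 (d.getD ic.2 0 + (10 : Int) ^ (n - ic.1 - 1).toNat))
      (PySem.Dict.nodup_keys_insert d _ _ hnd)
    refine ⟨hnd', ?_⟩
    rw [List.foldl_cons, hsum, insert_itemSum v d ic.2 _ hnd]
    simp only [List.map_cons, List.sum_cons]
    ring

theorem stepB_itemSum (v : Char → Int) (word : String) (d : PySem.Dict Char Int) (hnd : d.keys.Nodup) :
    ((PySem.List.enumerate word.toList).foldl
      (fun d ic => d.insert ic.2 (d.getD ic.2 0 + (10 : Int) ^ (PySem.Str.len word - ic.1 - 1).toNat)) d).keys.Nodup ∧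
    itemSum v ((PySem.List.enumerate word.toList).foldl
      (fun d ic => d.insert ic.2 (d.getD ic.2 0 + (10 : Int) ^ (PySem.Str.len word - ic.1 - 1).toNat)) d).items =
      itemSum v d.items +
        ((PySem.List.enumerate word.toList).map
          (fun ic => v ic.2 * (10 : Int) ^ (PySem.Str.len word - ic.1 - 1).toNat)).sum :=
  fold_insert_itemSum v (PySem.Str.len word) (PySem.List.enumerate word.toList) d hnd

def rowSum (v : Char → Int) (word : String) : Int :=
  ((PySem.List.enumerate word.toList).map
    (fun ic => v ic.2 * (10 : Int) ^ (PySem.Str.len word - ic.1 - 1).toNat)).sum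

theorem buildWeightsB_aux (v : Char → Int) :
    ∀ (words : List String) (d : PySem.Dict Char Int), d.keys.Nodup →
      (words.foldl (fun d word =>
        let n : Int := PySem.Str.len word
        (PySem.List.enumerate word.toList).foldl
          (fun d ic => d.insert ic.2 (d.getD ic.2 0 + (10 : Int) ^ (n - ic.1 - 1).toNat)) d) d).keys.Nodup ∧
      itemSum v (words.foldl (fun d word =>
        let n : Int := PySem.Str.len word
        (PySem.List.enumerate word.toList).foldl
          (fun d ic => d.insert ic.2 (d.getD ic.2 0 + (10 : Int) ^ (n - ic.1 - 1).toNat)) d) d).items =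
        itemSum v d.items + (words.map (rowSum v)).sum := by
  intro words
  induction words with
  | nil => intro d hnd; simpa using hnd
  | cons word words ih =>
    intro d hnd
    obtain ⟨hnd1, hsum1⟩ := stepB_itemSum v word d hnd
    obtain ⟨hnd2, hsum2⟩ := ih _ hnd1
    refine ⟨hnd2, ?_⟩
    rw [List.foldl_cons, hsum2, hsum1]
    simp only [List.map_cons, List.sum_cons, rowSum]
    ring

theorem buildWeightsB_itemSum (v : Char → Int) (words : List String) :
    (buildWeightsB words).keys.Nodup ∧
    itemSum v (buildWeightsB words).items = (words.map (rowSum v)).sum := by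
  have h := buildWeightsB_aux v words PySem.Dict.empty (by simp [PySem.Dict.keys_empty])
  simpa [buildWeightsB, itemSum, PySem.Dict.empty] using h

theorem mem_keys_buildWeightsB_aux :
    ∀ (words : List String) (d : PySem.Dict Char Int) (c : Char),
      c ∈ (words.foldl (fun d word =>
        let n : Int := PySem.Str.len word
        (PySem.List.enumerate word.toList).foldl
          (fun d ic => d.insert ic.2 (d.getD ic.2 0 + (10 : Int) ^ (n - ic.1 - 1).toNat)) d) d).keys ↔
      c ∈ d.keys ∨ c ∈ words.flatMap String.toList := by
  intro words
  induction words with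
  | nil => intro d c; simp
  | cons word words ih =>
    intro d c
    rw [List.foldl_cons, ih]
    have hk : ((PySem.List.enumerate word.toList).foldl
        (fun d ic => d.insert ic.2 (d.getD ic.2 0 + (10 : Int) ^ (PySem.Str.len word - ic.1 - 1).toNat)) d).keys
        = PySem.Set.update d.keys ((PySem.List.enumerate word.toList).map (fun ic => ic.2)) :=
      PySem.Dict.keys_foldl_insert_key _ _ _ d
    rw [hk, PySem.List.map_snd_enumerate]
    rw [PySem.Set.mem_update]
    simp [or_assoc]

theorem mem_keys_buildWeightsB (words : List String) (c : Char) :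
    c ∈ (buildWeightsB words).keys ↔ c ∈ words.flatMap String.toList := by
  have h := mem_keys_buildWeightsB_aux words PySem.Dict.empty c
  simpa [buildWeightsB, PySem.Dict.keys_empty] using h

-- ---------- the assignment dict (second loop of A) ----------
theorem getD_foldl_insert_of_fresh (k : Char) :
    ∀ (L : List (Char × Int)) (d : PySem.Dict Char Int) (v : Int),
      k ∉ L.map Prod.fst →
      ((L.foldl (fun p cw => (p.1.insert cw.1 p.2, p.2 - 1)) (d, v)).1).getD k 0 = d.getD k 0 := by
  intro L
  induction L with
  | nil => intro d v _; rfl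
  | cons cw L ih =>
    intro d v hk
    rw [List.foldl_cons, ih _ _ (fun h => hk (List.mem_cons_of_mem _ h))]
    exact PySem.Dict.getD_insert_of_ne d _ _ (fun h => hk (List.mem_cons.mpr (Or.inl h)))

theorem assign_getD :
    ∀ (L : List (Char × Int)) (d : PySem.Dict Char Int) (v : Int) (i : Nat) (h : i < L.length),
      (L.map Prod.fst).Nodup →
      ((L.foldl (fun p cw => (p.1.insert cw.1 p.2, p.2 - 1)) (d, v)).1).getD (L[i].1) 0 = v - i := by
  intro L
  induction L with
  | nil => intro d v i h; simp at h
  | cons cw L ih =>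
    intro d v i h hnd
    rw [List.map_cons] at hnd
    obtain ⟨hfst, hrest⟩ := List.nodup_cons.mp hnd
    cases i with
    | zero =>
      rw [List.foldl_cons]
      simp only [List.getElem_cons_zero]
      rw [getD_foldl_insert_of_fresh cw.1 L _ _ hfst]
      simp [PySem.Dict.getD_insert_self]
    | succ i =>
      rw [List.foldl_cons]
      simp only [List.getElem_cons_succ]
      rw [ih _ _ i (Nat.lt_of_succ_lt_succ h) hrest]
      push_cast
      ring

-- ---------- positional value of a digit fold ----------
theorem foldl_dec_pos (g : Char → Nat) (n : Int) :
    ∀ (t : List Char) (acc : Nat),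
      ((t.foldl (fun a c => a * 10 + g c) acc : Nat) : Int) =
        (acc : Int) * 10 ^ t.length +
          ((PySem.List.enumerate t (n - t.length)).map
            (fun ic => (g ic.2 : Int) * (10 : Int) ^ (n - ic.1 - 1).toNat)).sum := by
  intro t
  induction t with
  | nil => intro acc; simp [PySem.List.enumerate_nil]
  | cons c t ih =>
    intro acc
    rw [List.foldl_cons, ih]
    have hs : n - (↑(t.length) + 1) + 1 = n - ↑t.length := by ring
    rw [show ((c :: t).length : Int) = (t.length : Int) + 1 by simp]
    rw [PySem.List.enumerate_cons, hs]
    simp only [List.map_cons, List.sum_cons]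
    have hexp : (n - (n - (↑t.length + 1)) - 1) = (t.length : Int) := by ring
    rw [hexp]
    rw [Int.toNat_natCast]
    push_cast
    simp [List.length_cons]
    ring

-- ---------- the two first passes build the same dict ----------
theorem buildWeights_eq (words : List String) : buildWeightsA words = buildWeightsB words := by
  unfold buildWeightsA buildWeightsB
  congr 1
  funext d word
  show (PySem.List.pyRange 0 (PySem.Str.len word)).foldl
      (fun d i => d.modify (PySem.List.pyGetD word.toList i ' ') 0
        (fun v => v + (10 : Int) ^ (PySem.Str.len word - i - 1).toNat)) d =
    (PySem.List.enumerate word.toList).foldl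
      (fun d ic => d.insert ic.2 (d.getD ic.2 0 + (10 : Int) ^ (PySem.Str.len word - ic.1 - 1).toNat)) d
  rw [PySem.List.enumerate_eq_map_pyRange word.toList ' ', List.foldl_map]
  rw [show PySem.List.len word.toList = PySem.Str.len word from rfl]
  rfl

-- ---------- per-word value of A's third loop ----------
theorem wordNumA_eq (M : PySem.Dict Char Int) (w : String) (hw : w.toList ≠ [])
    (hdig : ∀ c ∈ w.toList, 0 ≤ M.getD c 0 ∧ M.getD c 0 ≤ 9) :
    wordNumA M w = rowSum (fun c => M.getD c 0) w := by
  unfold wordNumA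
  rw [PySem.List.foldl_append_singleton_eq_map, List.nil_append]
  rw [List.map_congr_left (fun c hc => toChars_digit _ (hdig c hc).1 (hdig c hc).2)]
  rw [show (List.map (fun c => [digitChr (M.getD c 0)]) w.toList) =
      List.map (fun c => [c]) (w.toList.map (fun c => digitChr (M.getD c 0))) by
    rw [List.map_map]; rfl]
  rw [PySem.Chars.join_nil_singletons]
  rw [parse_digits _ (by simpa using hw) ?hd]
  case hd =>
    intro c hc
    obtain ⟨c', hc', rfl⟩ := List.mem_map.mp hc
    exact digitChr_isDigit _ (hdig c' hc').1 (hdig c' hc').2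
  rw [Option.getD_some, List.foldl_map]
  rw [PySem.List.foldl_congr_mem w.toList _
    (fun a c => a * 10 + (M.getD c 0).toNat) 0
    (fun acc x hx => by rw [digitChr_toNat _ (hdig x hx).1 (hdig x hx).2])]
  rw [foldl_dec_pos (fun c => (M.getD c 0).toNat) (w.toList.length : Int) w.toList 0]
  rw [sub_self]
  simp only [Nat.cast_zero, zero_mul, zero_add]
  unfold rowSum
  rw [show PySem.Str.len w = ((w.toList.length : Nat) : Int) from rfl]
  refine congrArg List.sum ?_
  refine List.map_congr_left ?_
  intro ic hic
  obtain ⟨k, hk, rfl⟩ := (PySem.List.mem_enumerate_iff _ _ _).mp hic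
  exact congrArg (fun z => z * (10 : Int) ^ (((w.toList.length : Nat) : Int) - (0 + (k : Int)) - 1).toNat)
    (Int.toNat_of_nonneg (hdig _ (List.getElem_mem hk)).1)

-- ---------- main proof ----------
theorem solution_spec : Claim_equal_solution := by
  intro N words _ hpre
  obtain ⟨hwne, hcard⟩ := hpre
  show solution N words = solution_alt N words
  unfold solution solution_alt
  rw [buildWeights_eq]
  set W := buildWeightsB words with hW
  set L := PySem.List.sorted W.items (fun x => x.2) true with hL
  set M := (assignA L).1 with hM
  set dval : Char → Int := fun c => M.getD c 0 with hdval
  obtain ⟨hndW, hsumW⟩ := buildWeightsB_itemSum dval words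
  have hperm : L.Perm W.items := PySem.List.sorted_perm _ _ _
  have hkeys : W.keys = W.items.map Prod.fst := rfl
  have hfstperm : (L.map Prod.fst).Perm W.keys := by
    rw [hkeys]; exact hperm.map _
  have hndL : (L.map Prod.fst).Nodup := (hfstperm.nodup_iff).mpr hndW
  have hlen : L.length ≤ 10 := by
    have h1 : W.keys.Subperm (PySem.Set.ofList (words.flatMap String.toList)) := by
      refine List.subperm_of_subset ?_ ?_
      · exact hndW
      · intro c hc
        rw [PySem.Set.mem_ofList]
        exact (mem_keys_buildWeightsB words c).mp hc
    have h2 : W.keys.length ≤ (PySem.Set.ofList (words.flatMap String.toList)).length :=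
      h1.length_le
    have h3 : L.length = W.keys.length := by
      rw [hkeys, List.length_map]
      exact hperm.length_eq
    omega
  have hrank : ∀ c ∈ words.flatMap String.toList, ∃ i : Nat, ∃ hi : i < L.length,
      L[i].1 = c := by
    intro c hc
    have : c ∈ L.map Prod.fst := hfstperm.mem_iff.mpr ((mem_keys_buildWeightsB words c).mpr hc)
    obtain ⟨p, hp, hpc⟩ := List.mem_map.mp this
    obtain ⟨i, hi, hip⟩ := List.mem_iff_getElem.mp hp
    exact ⟨i, hi, by rw [hip, hpc]⟩
  have hdvali : ∀ (i : Nat) (hi : i < L.length), dval L[i].1 = 9 - i := by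
    intro i hi
    show ((assignA L).1).getD L[i].1 0 = 9 - (i : Int)
    unfold assignA
    exact assign_getD L PySem.Dict.empty 9 i hi hndL
  have hdig : ∀ c ∈ words.flatMap String.toList, 0 ≤ dval c ∧ dval c ≤ 9 := by
    intro c hc
    obtain ⟨i, hi, hic⟩ := hrank c hc
    rw [← hic, hdvali i hi]
    have : i ≤ 9 := by omega
    constructor <;> [omega; omega]
  -- A's answer as a sum of per-word values
  rw [PySem.List.foldl_add words (fun w => wordNumA M w) 0, zero_add]
  rw [List.map_congr_left (fun w hw => wordNumA_eq M w
    (fun h => hwne w hw (by rwa [← String.toList_eq_nil_iff]))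
    (fun c hc => hdig c (List.mem_flatMap.mpr ⟨w, hw, hc⟩)))]
  rw [← hsumW]
  -- relate itemSum over the dict to the enumerate-fold of B
  have hsumL : itemSum dval W.items = itemSum dval L := by
    unfold itemSum
    exact ((hperm.map _).sum_eq).symm
  rw [hsumL]
  rw [PySem.List.foldl_add (PySem.List.enumerate L) (fun vp => vp.2.2 * (9 - vp.1)) 0, zero_add]
  unfold itemSum
  congr 1
  refine List.ext_getElem (by simp [PySem.List.length_enumerate]) ?_
  intro i hi hi'
  have hiL : i < L.length := by simpa using hi
  rw [List.getElem_map, List.getElem_map]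
  rw [PySem.List.getElem_enumerate]
  show dval L[i].1 * L[i].2 = L[i].2 * (9 - (0 + (i : Int)))
  rw [hdvali i hiL, zero_add]
  ring
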